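-- pv_equiv track=rewrite | github.com/Leandecks/python | 3/binary/numbers/complementi.py | complemento_1
-- ===== SOURCE A (Python) =====
-- def complemento_1(s):
--     stringa = ""
--     for k in s:
--         if k == "0":
--             stringa += "1"
--         if k == "1":
--             stringa += "0"
--     return bin(int(stringa, base = 2))
-- ===== SOURCE B (Python) =====
-- def complemento_1(s):
--     bits = "".join(c for c in s if c in "01")
--     v = int(bits, 2)
--     mask = (1 << len(bits)) - 1
--     return bin(mask - v)
-- ===== Notes on version B (the rewrite author's own statement) =====
-- stated objective: alternative
-- what changed: Instead of flipping each bit character and parsing the flipped string, B parses the filtered original bits once and computes the one's complement arithmetically as ((1 << n) - 1) - v, i.e. subtraction from the all-ones mask.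
import Mathlib
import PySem

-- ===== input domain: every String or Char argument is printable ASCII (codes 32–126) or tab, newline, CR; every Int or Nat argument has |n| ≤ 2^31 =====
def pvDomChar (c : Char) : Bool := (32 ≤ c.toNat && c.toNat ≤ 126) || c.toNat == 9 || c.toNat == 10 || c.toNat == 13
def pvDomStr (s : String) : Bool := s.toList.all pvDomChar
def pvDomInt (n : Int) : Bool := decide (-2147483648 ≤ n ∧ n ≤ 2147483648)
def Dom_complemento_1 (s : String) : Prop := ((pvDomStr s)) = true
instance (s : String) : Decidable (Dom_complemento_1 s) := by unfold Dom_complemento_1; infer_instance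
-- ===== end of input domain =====

-- B computes the one's complement arithmetically — parse the ORIGINAL bits once and subtract
-- from the all-ones mask ((1 << n) - 1) - v — instead of A's per-character flip of the string
-- before parsing (objective: alternative algorithm, same O(n) cost).

-- ===== PORT A =====
-- int(cs, base=2) ported by hand (PySem.Int.ofCharsBase? exists but its digit evaluator is
-- private, so this helper is used by both ports): on the lists both Pythons ever pass here —
-- lists of '0'/'1' characters only — Horner evaluation is exactly int(·, 2), and the empty
-- list is exactly the ValueError case (none).
def pvInt2? (cs : List Char) : Option Int :=
  match cs with
  | [] => none
  | _ => some (cs.foldl (fun a c => 2 * a + (if c = '1' then 1 else 0)) 0)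

-- stringa is modelled as its List Char; 'stringa += "1"' is '++ ['1']'; bin(…) is PySem.Int.pyBin.
-- The none branch (int raises ValueError on an empty string) is excluded by Pre_.
def complemento_1 (s : String) : String :=
  let stringa : List Char := s.toList.foldl (fun stringa k =>
    let stringa := if k = '0' then stringa ++ ['1'] else stringa
    let stringa := if k = '1' then stringa ++ ['0'] else stringa
    stringa) []
  match pvInt2? stringa with
  | some n => PySem.Int.pyBin n
  | none => ""

-- ===== PORT B =====
-- bits = ''.join(c for c in s if c in "01"); v = int(bits, 2); mask = (1 << len(bits)) - 1; bin(mask - v)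
def complemento_1_alt (s : String) : String :=
  let bits : List Char := s.toList.filter (fun c => c == '0' || c == '1')
  match pvInt2? bits with
  | some v =>
    let mask : Int := ((1 : Int) <<< bits.length) - 1
    PySem.Int.pyBin (mask - v)
  | none => ""

-- ===== PRECONDITION & SPEC =====
-- Pre_ excludes exactly the strings containing no '0'/'1' character, on which A's
-- int(stringa, base=2) raises ValueError (B's int(bits, 2) raises there too).
def Pre_complemento_1 (s : String) : Prop := (s.toList.any (fun c => c == '0' || c == '1')) = true
instance (s : String) : Decidable (Pre_complemento_1 s) := by unfold Pre_complemento_1; infer_instance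
def pvWitness_complemento_1 : String := "a10"

def Spec_complemento_1 (s : String) (out : String) : Prop := out = complemento_1_alt s
instance (s : String) (out : String) : Decidable (Spec_complemento_1 s out) := by unfold Spec_complemento_1; infer_instance

-- ===== CLAIM (what is proved, stated in full; the proofs are below) =====
def Claim_equal_complemento_1 : Prop := ∀ (s : String), Dom_complemento_1 s → Pre_complemento_1 s → Spec_complemento_1 s (complemento_1 s)

-- ===== LEMMAS AND PROOFS =====

-- the bit flip A performs, as a function on the (already filtered) bit characters
def pvFlip (c : Char) : Char := if c = '0' then '1' else '0'

-- A's accumulator loop builds exactly the flip-image of the filtered bits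
theorem pvBuild (cs : List Char) (acc : List Char) :
    cs.foldl (fun stringa k =>
        let stringa := if k = '0' then stringa ++ ['1'] else stringa
        let stringa := if k = '1' then stringa ++ ['0'] else stringa
        stringa) acc
      = acc ++ (cs.filter (fun c => c == '0' || c == '1')).map pvFlip := by
  induction cs generalizing acc with
  | nil => simp
  | cons c cs ih =>
    simp only [List.foldl_cons, List.filter_cons, ih]
    by_cases h0 : c = '0'
    · subst h0; simp [pvFlip]
    · by_cases h1 : c = '1'
      · subst h1; simp [pvFlip]
      · simp [h0, h1]

-- Horner value of the flipped bits + Horner value of the bits = (a + b + 1) * 2^n - 1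
theorem pvFlipVal (bs : List Char) (hbs : ∀ c ∈ bs, c = '0' ∨ c = '1') (a b : Int) :
    (bs.map pvFlip).foldl (fun a c => 2 * a + (if c = '1' then 1 else 0)) a
      + bs.foldl (fun a c => 2 * a + (if c = '1' then 1 else 0)) b
      = (a + b + 1) * 2 ^ bs.length - 1 := by
  induction bs generalizing a b with
  | nil => simp only [List.map_nil, List.foldl_nil, List.length_nil, pow_zero]; ring
  | cons c cs ih =>
    have hcs : ∀ c ∈ cs, c = '0' ∨ c = '1' := fun d hd => hbs d (by simp [hd])
    have e0 : (if ('0' : Char) = '1' then (1 : Int) else 0) = 0 := by decide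
    have f0 : pvFlip '0' = '1' := by decide
    have f1 : pvFlip '1' = '0' := by decide
    rcases hbs c (by simp) with h | h <;> subst h
    · simp only [List.map_cons, List.foldl_cons, List.length_cons, f0, e0, if_true]
      rw [ih hcs]; ring
    · simp only [List.map_cons, List.foldl_cons, List.length_cons, f1, e0, if_true]
      rw [ih hcs]; ring

-- ===== VERDICT (by name: the statement is the Claim_ definition above) =====
theorem complemento_1_spec : Claim_equal_complemento_1 := by
  intro s _ hpre
  unfold Spec_complemento_1 complemento_1 complemento_1_alt
  rw [pvBuild]
  simp only [List.nil_append]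
  set bs := s.toList.filter (fun c => c == '0' || c == '1') with hbsdef
  have hne : bs ≠ [] := by
    unfold Pre_complemento_1 at hpre
    simp only [List.any_eq_true] at hpre
    obtain ⟨c, hc, hcb⟩ := hpre
    intro h
    have : c ∈ bs := by rw [hbsdef]; exact List.mem_filter.mpr ⟨hc, hcb⟩
    simp [h] at this
  have hbits : ∀ c ∈ bs, c = '0' ∨ c = '1' := by
    intro c hc
    have := (List.mem_filter.mp (hbsdef ▸ hc)).2
    rcases Bool.or_eq_true_iff.mp this with h | h
    · exact Or.inl (by exact_mod_cast beq_iff_eq.mp h)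
    · exact Or.inr (by exact_mod_cast beq_iff_eq.mp h)
  obtain ⟨c, cs, hcons⟩ := List.exists_cons_of_ne_nil hne
  have hmne : bs.map pvFlip ≠ [] := by simp [hcons]
  unfold pvInt2?
  rw [hcons]
  have key := pvFlipVal bs hbits 0 0
  rw [hcons] at key
  simp only [List.map_cons] at key ⊢
  congr 1
  have hmask : (1 : Int) <<< (c :: cs).length = 2 ^ (c :: cs).length := by
    simp [Int.shiftLeft_eq]
  rw [hmask]
  omega
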